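-- pv_equiv track=rewrite | github.com/HVision-NKU/ASID-Caption | eval_scripts/Attrbute/evaluation.py | normalize_attrs
-- ===== SOURCE A (Python) =====
-- ATTRS_8 = [
--     "scene",
--     "characters",
--     "objects",
--     "actions",
--     "narrative elements",
--     "speech",
--     "camera",
--     "emotions",
-- ]
--
-- def normalize_attrs(attrs):
--     out = []
--     if not isinstance(attrs, list):
--         return out
--     for a in attrs:
--         if isinstance(a, str):
--             a2 = a.strip().lower()
--             if a2 in ATTRS_8:
--                 out.append(a2)
--     out = sorted(set(out), key=ATTRS_8.index)
--     return out
-- ===== SOURCE B (Python) =====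
-- ATTRS_8 = [
--     "scene",
--     "characters",
--     "objects",
--     "actions",
--     "narrative elements",
--     "speech",
--     "camera",
--     "emotions",
-- ]
--
-- def normalize_attrs(attrs):
--     if not isinstance(attrs, list):
--         return []
--     return [c for c in ATTRS_8
--             if any(isinstance(a, str) and a.strip().lower() == c for a in attrs)]
-- ===== Notes on version B (the rewrite author's own statement) =====
-- stated objective: simpler
-- what changed: B inverts the loop structure: instead of accumulating valid normalized items and then deduplicating with set() and sorting by ATTRS_8.index, it iterates the canonical ATTRS_8 list once and keeps each canonical attribute iff some input element normalizes to it (an inner any-scan), which yields the canonical order and dedup for free.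
import Mathlib
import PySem

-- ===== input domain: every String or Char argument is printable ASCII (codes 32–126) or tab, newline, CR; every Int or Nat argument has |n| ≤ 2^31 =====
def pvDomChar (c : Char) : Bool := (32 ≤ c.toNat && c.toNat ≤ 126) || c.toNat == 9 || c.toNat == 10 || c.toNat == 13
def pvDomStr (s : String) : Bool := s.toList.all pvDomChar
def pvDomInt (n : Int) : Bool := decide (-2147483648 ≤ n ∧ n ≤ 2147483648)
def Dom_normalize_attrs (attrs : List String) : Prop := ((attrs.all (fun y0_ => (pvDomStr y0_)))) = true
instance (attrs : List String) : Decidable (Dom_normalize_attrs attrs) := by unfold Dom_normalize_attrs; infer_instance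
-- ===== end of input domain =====

-- B is simpler: it inverts the loops — one scan over the canonical ATTRS_8, keeping each
-- attribute iff some input normalizes to it — instead of A's accumulate + set() dedup +
-- sorted(key=ATTRS_8.index).

-- ===== PORT A =====
def ATTRS_8 : List String :=
  ["scene", "characters", "objects", "actions",
   "narrative elements", "speech", "camera", "emotions"]

def normalize_attrs (attrs : List String) : List String :=
  -- attrs : List String, so 'isinstance(attrs, list)' / 'isinstance(a, str)' are always true
  let out := attrs.foldl (fun out a =>
      let a2 := PySem.Str.lower (PySem.Str.strip a)
      if a2 ∈ ATTRS_8 then out ++ [a2] else out) []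
  -- sorted(set(out), key=ATTRS_8.index): key is injective on the set, so hash order is immaterial
  PySem.List.sorted (PySem.Set.ofList out) (fun a => ATTRS_8.idxOf a) false

-- ===== PORT B =====
def normalize_attrs_alt (attrs : List String) : List String :=
  ATTRS_8.filter (fun c => attrs.any (fun a => PySem.Str.lower (PySem.Str.strip a) == c))

-- ===== PRECONDITION & SPEC =====
def Spec_normalize_attrs (attrs : List String) (out : List String) : Prop := out = normalize_attrs_alt attrs
instance (attrs : List String) (out : List String) : Decidable (Spec_normalize_attrs attrs out) := by unfold Spec_normalize_attrs; infer_instance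

-- ===== CLAIM (what is proved, stated in full; the proofs are below) =====
def Claim_equal_normalize_attrs : Prop := ∀ (attrs : List String), Dom_normalize_attrs attrs → Spec_normalize_attrs attrs (normalize_attrs attrs)

-- ===== LEMMAS AND PROOFS =====

-- membership in A's accumulated list: x was seeded or some input normalizes to x (and x is valid)
theorem pv_fold_mem (attrs : List String) : ∀ (acc : List String) (x : String),
    x ∈ attrs.foldl (fun out a =>
      let a2 := PySem.Str.lower (PySem.Str.strip a)
      if a2 ∈ ATTRS_8 then out ++ [a2] else out) acc
    ↔ x ∈ acc ∨ (x ∈ ATTRS_8 ∧ ∃ a ∈ attrs, PySem.Str.lower (PySem.Str.strip a) = x) := by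
  induction attrs with
  | nil => intro acc x; simp
  | cons a t ih =>
    intro acc x
    simp only [List.foldl_cons, ih, List.mem_cons]
    by_cases h : PySem.Str.lower (PySem.Str.strip a) ∈ ATTRS_8
    · simp only [h, if_pos, List.mem_append, List.mem_singleton]
      constructor
      · rintro (((hx | rfl) | ⟨h1, b, hb, h2⟩))
        · exact Or.inl hx
        · exact Or.inr ⟨h, a, Or.inl rfl, rfl⟩
        · exact Or.inr ⟨h1, b, Or.inr hb, h2⟩
      · rintro (hx | ⟨h1, b, (rfl | hb), h2⟩)
        · exact Or.inl (Or.inl hx)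
        · exact Or.inl (Or.inr h2.symm)
        · exact Or.inr ⟨h1, b, hb, h2⟩
    · simp only [h, if_neg, not_false_iff]
      constructor
      · rintro (hx | ⟨h1, b, hb, h2⟩)
        · exact Or.inl hx
        · exact Or.inr ⟨h1, b, Or.inr hb, h2⟩
      · rintro (hx | ⟨h1, b, (rfl | hb), h2⟩)
        · exact Or.inl hx
        · exact absurd (h2 ▸ h1) h
        · exact Or.inr ⟨h1, b, hb, h2⟩

theorem pv_attrs8_pairwise : ATTRS_8.Pairwise (fun a b => ATTRS_8.idxOf a < ATTRS_8.idxOf b) := by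
  decide

theorem pv_attrs8_nodup : ATTRS_8.Nodup := by decide

theorem pv_main : ∀ (attrs : List String), Spec_normalize_attrs attrs (normalize_attrs attrs) := by
  intro attrs
  unfold Spec_normalize_attrs normalize_attrs normalize_attrs_alt
  -- B's filter is a strictly key-increasing rearrangement of set(out); A's sorted picks that order
  apply PySem.List.sorted_eq_of_perm_of_pairwise_lt
  · rw [List.perm_ext_iff_of_nodup (List.Nodup.filter _ pv_attrs8_nodup) (PySem.Set.nodup_ofList _)]
    intro x
    simp only [List.mem_filter, PySem.Set.mem_ofList, pv_fold_mem, List.not_mem_nil, false_or,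
      List.any_eq_true, beq_iff_eq]
  · exact List.Pairwise.filter _ pv_attrs8_pairwise

-- ===== VERDICT (by name: the statement is the Claim_ definition above) =====
theorem normalize_attrs_spec : Claim_equal_normalize_attrs := fun attrs _ => pv_main attrs
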